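-- pv_equiv track=rewrite | github.com/mwchang/c | kicknock.py | addict
-- ===== SOURCE A (Python) =====
-- def addict(dictarray, purearray):
--     pair = zip(dictarray.keys(), dictarray.values())
--     start = 0; end = 0
--     for key, value in pair:
--         num = len(value)
--         start, end = end, end + num
--         dictarray[key] = dictarray[key] + purearray[start:end]
--     return dictarray
-- ===== SOURCE B (Python) =====
-- def addict(dictarray, purearray):
--     # Distribute the elements of purearray one by one into per-key chunks,
--     # then write every chunk back; no offsets or slices are ever computed.
--     todo = list(dictarray.items())   # keys still waiting for their chunk
--     chunks = {}                      # key -> chunk collected so far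
--     need = 0                         # how many more elements the current key takes
--     k = None
--     for x in purearray:
--         while need == 0 and todo:
--             k, v = todo.pop(0)
--             chunks[k] = []
--             need = len(v)
--         if need == 0:
--             break
--         chunks[k].append(x)
--         need -= 1
--     for key, value in list(dictarray.items()):
--         dictarray[key] = value + chunks.get(key, [])
--     return dictarray
-- ===== Notes on version B (the rewrite author's own statement) =====
-- stated objective: alternative
-- what changed: B iterates over purearray instead of over the dict: it deals the elements one by one into per-key chunks (a queue of keys with remaining capacities, no offsets and no slicing at all) and then writes every chunk back, whereas A loops over the dict keys maintaining running start/end offsets and slicing purearray.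
import Mathlib
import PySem

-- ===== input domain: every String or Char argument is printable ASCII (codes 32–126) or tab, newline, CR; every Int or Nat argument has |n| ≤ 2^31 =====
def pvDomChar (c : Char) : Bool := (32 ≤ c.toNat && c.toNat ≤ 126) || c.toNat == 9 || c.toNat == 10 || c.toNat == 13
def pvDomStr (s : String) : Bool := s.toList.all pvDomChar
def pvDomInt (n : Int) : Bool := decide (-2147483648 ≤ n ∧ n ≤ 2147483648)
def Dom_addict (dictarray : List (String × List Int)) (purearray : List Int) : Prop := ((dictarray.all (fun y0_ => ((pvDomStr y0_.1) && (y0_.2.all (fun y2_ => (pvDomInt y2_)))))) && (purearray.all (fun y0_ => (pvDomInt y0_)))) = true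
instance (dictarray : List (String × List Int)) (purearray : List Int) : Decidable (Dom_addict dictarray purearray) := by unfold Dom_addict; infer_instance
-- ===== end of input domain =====

-- B replaces A's offset/slice loop over the dict by distributing the elements of purearray one by
-- one into per-key chunks (no offsets or slices at all), then writing the chunks back
-- (objective: alternative algorithm). Equivalence is about the return value; both mutate the dict.

-- ===== PORT A =====
def addict (dictarray : List (String × List Int)) (purearray : List Int) : List (String × List Int) :=
  let d0 : PySem.Dict String (List Int) := ⟨dictarray⟩
  let pair := d0.keys.zip d0.values
  (pair.foldl (fun st kv =>
      let num := PySem.List.len kv.2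
      let start := st.2.2
      let e := st.2.2 + num
      (st.1.insert kv.1 (st.1.getD kv.1 [] ++ PySem.List.slice purearray (some start) (some e)),
       start, e))
    (d0, (0 : Int), (0 : Int))).1.items

-- ===== PORT B =====
-- the `while need == 0 and todo:` loop of Source B (pops finished-capacity keys off the queue)
def pvAdvance (todo : List (String × List Int)) (chunks : PySem.Dict String (List Int))
    (need : Int) (k : String) :
    List (String × List Int) × PySem.Dict String (List Int) × Int × String :=
  if need = 0 then
    match todo with
    | [] => ([], chunks, need, k)
    | (k', v) :: rest => pvAdvance rest (chunks.insert k' []) (PySem.List.len v) k'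
  else (todo, chunks, need, k)
termination_by todo.length
decreasing_by simp_all

def addict_alt (dictarray : List (String × List Int)) (purearray : List Int) : List (String × List Int) :=
  let d0 : PySem.Dict String (List Int) := ⟨dictarray⟩
  -- for x in purearray: distribute x (the `break` leaves the state unchanged for the rest)
  let fin := purearray.foldl (fun st x =>
      let s := pvAdvance st.1 st.2.1 st.2.2.1 st.2.2.2
      if s.2.2.1 = 0 then s
      else (s.1, s.2.1.insert s.2.2.2 (s.2.1.getD s.2.2.2 [] ++ [x]), s.2.2.1 - 1, s.2.2.2))
    (d0.items, (⟨[]⟩ : PySem.Dict String (List Int)), (0 : Int), "")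
  let chunks := fin.2.1
  (d0.items.foldl (fun d kv => d.insert kv.1 (kv.2 ++ chunks.getD kv.1 [])) d0).items

-- ===== PRECONDITION & SPEC =====
-- Pre_ excludes association lists with duplicate keys: the argument is a Python dict, which
-- cannot contain two equal keys, so such lists do not represent any input of A.
def Pre_addict (dictarray : List (String × List Int)) (purearray : List Int) : Prop :=
  (dictarray.map Prod.fst).Nodup
instance (dictarray : List (String × List Int)) (purearray : List Int) : Decidable (Pre_addict dictarray purearray) := by unfold Pre_addict; infer_instance
def pvWitness_addict : (List (String × List Int)) × List Int :=
  ([("a", [1, 2]), ("b", [3])], [10, 20, 30, 40])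

def Spec_addict (dictarray : List (String × List Int)) (purearray : List Int) (out : List (String × List Int)) : Prop := out = addict_alt dictarray purearray
instance (dictarray : List (String × List Int)) (purearray : List Int) (out : List (String × List Int)) : Decidable (Spec_addict dictarray purearray out) := by unfold Spec_addict; infer_instance

-- ===== CLAIM (what is proved, stated in full; the proofs are below) =====
def Claim_equal_addict : Prop := ∀ (dictarray : List (String × List Int)) (purearray : List Int), Dom_addict dictarray purearray → Pre_addict dictarray purearray → Spec_addict dictarray purearray (addict dictarray purearray)

-- ===== LEMMAS AND PROOFS =====

-- the common normal form: each value extended by the slice at its running offset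
def pvTr (p : List Int) : List (String × List Int) → Int → List (String × List Int)
  | [], _ => []
  | (k, v) :: t, e =>
      (k, v ++ PySem.List.slice p (some e) (some (e + PySem.List.len v)))
        :: pvTr p t (e + PySem.List.len v)

theorem pv_getD_mid (pre t : List (String × List Int)) (k : String) (v : List Int)
    (hk : k ∉ pre.map Prod.fst) :
    (PySem.Dict.mk (pre ++ (k, v) :: t)).getD k [] = v := by
  induction pre with
  | nil => simp [PySem.Dict.getD, PySem.Dict.get?]
  | cons x pre ih =>
      simp only [List.map_cons, List.mem_cons, not_or] at hk
      simpa [PySem.Dict.getD, PySem.Dict.get?, List.find?, Ne.symm hk.1]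
        using ih hk.2

theorem pv_insert_mid (pre t : List (String × List Int)) (k : String) (v w : List Int)
    (hk : k ∉ pre.map Prod.fst) (ht : k ∉ t.map Prod.fst) :
    (PySem.Dict.mk (pre ++ (k, v) :: t)).insert k w = ⟨pre ++ (k, w) :: t⟩ := by
  have hc : (PySem.Dict.mk (pre ++ (k, v) :: t)).contains k = true := by
    simp
  simp only [PySem.Dict.insert, hc, if_pos]
  congr 1
  have hpre : pre.map (fun p => if (p.1 == k) = true then (k, w) else p) = pre := by
    rw [List.map_congr_left (g := id) ?_, List.map_id]
    intro p hp
    have : p.1 ≠ k := fun h => hk (h ▸ List.mem_map_of_mem hp)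
    simp [this]
  have htl : t.map (fun p => if (p.1 == k) = true then (k, w) else p) = t := by
    rw [List.map_congr_left (g := id) ?_, List.map_id]
    intro p hp
    have : p.1 ≠ k := fun h => ht (h ▸ List.mem_map_of_mem hp)
    simp [this]
  rw [List.map_append, List.map_cons, hpre, htl]
  simp

-- inserting a key that is not present appends it
theorem pv_insert_new (pre : List (String × List Int)) (k : String) (v : List Int)
    (hk : k ∉ pre.map Prod.fst) :
    (PySem.Dict.mk pre).insert k v = ⟨pre ++ [(k, v)]⟩ := by
  have hc : (PySem.Dict.mk pre).contains k = false := by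
    simp [PySem.Dict.contains]
    intro a b hab hk'
    exact absurd (hk' ▸ List.mem_map_of_mem hab (f := Prod.fst)) hk
  simp [PySem.Dict.insert, hc]

theorem pv_foldA (p : List Int) :
    ∀ (rest pre : List (String × List Int)) (s e : Int),
    ((pre ++ rest).map Prod.fst).Nodup →
    ((rest.foldl (fun st kv =>
        let num := PySem.List.len kv.2
        let start := st.2.2
        let e := st.2.2 + num
        (st.1.insert kv.1 (st.1.getD kv.1 [] ++ PySem.List.slice p (some start) (some e)),
         start, e))
      ((⟨pre ++ rest⟩ : PySem.Dict String (List Int)), s, e)).1).items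
      = pre ++ pvTr p rest e := by
  intro rest
  induction rest with
  | nil => intro pre s e _; simp [pvTr]
  | cons x t ih =>
      intro pre s e hnd
      obtain ⟨k, v⟩ := x
      have hk : k ∉ pre.map Prod.fst := by
        simp only [List.map_append, List.map_cons, List.nodup_append] at hnd
        intro hmem
        exact hnd.2.2 _ hmem _ List.mem_cons_self rfl
      have ht : k ∉ t.map Prod.fst := by
        simp only [List.map_append, List.map_cons, List.nodup_append, List.nodup_cons] at hnd
        exact hnd.2.1.1
      simp only [List.foldl_cons]
      rw [pv_getD_mid pre t k v hk, pv_insert_mid pre t k v _ hk ht]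
      have hre : (pre ++ (k, v ++ PySem.List.slice p (some e) (some (e + PySem.List.len v))) :: t)
          = (pre ++ [(k, v ++ PySem.List.slice p (some e) (some (e + PySem.List.len v)))]) ++ t := by
        simp
      rw [hre, ih _ e (e + PySem.List.len v) (by simpa using hnd)]
      simp [pvTr]

theorem pv_foldA0 (p : List Int) (L : List (String × List Int))
    (h : (L.map Prod.fst).Nodup) :
    ((L.foldl (fun st kv =>
        let num := PySem.List.len kv.2
        let start := st.2.2
        let e := st.2.2 + num
        (st.1.insert kv.1 (st.1.getD kv.1 [] ++ PySem.List.slice p (some start) (some e)),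
         start, e))
      ((⟨L⟩ : PySem.Dict String (List Int)), (0 : Int), (0 : Int))).1).items = pvTr p L 0 := by
  simpa using pv_foldA p L [] 0 0 (by simpa using h)

-- ---- B side ----

-- the fold body of addict_alt, named for the proofs
def pvBody (st : List (String × List Int) × PySem.Dict String (List Int) × Int × String)
    (x : Int) : List (String × List Int) × PySem.Dict String (List Int) × Int × String :=
  let s := pvAdvance st.1 st.2.1 st.2.2.1 st.2.2.2
  if s.2.2.1 = 0 then s
  else (s.1, s.2.1.insert s.2.2.2 (s.2.1.getD s.2.2.2 [] ++ [x]), s.2.2.1 - 1, s.2.2.2)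

-- chunks actually collected: per key the next len-v elements of p, stopping when p runs out
def pvTrunc (p : List Int) : List (String × List Int) → List (String × List Int)
  | [] => []
  | (k, v) :: t => if p = [] then [] else (k, p.take v.length) :: pvTrunc (p.drop v.length) t

-- what the write-back pass produces: every value extended by its chunk
def pvZip (p : List Int) : List (String × List Int) → List (String × List Int)
  | [] => []
  | (k, v) :: t => (k, v ++ p.take v.length) :: pvZip (p.drop v.length) t

theorem pvTrunc_nil (t : List (String × List Int)) : pvTrunc [] t = [] := by
  cases t with
  | nil => rfl
  | cons x t => obtain ⟨k, v⟩ := x; simp [pvTrunc]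

-- helper equations for pvAdvance
theorem pvAdvance_nil (ch : PySem.Dict String (List Int)) (c : Int) (k : String) :
    pvAdvance [] ch c k = ([], ch, c, k) := by
  rw [pvAdvance.eq_def]; split <;> rfl

theorem pvAdvance_zero_cons (k' : String) (v : List Int) (rest : List (String × List Int))
    (ch : PySem.Dict String (List Int)) (k : String) :
    pvAdvance ((k', v) :: rest) ch 0 k = pvAdvance rest (ch.insert k' []) (PySem.List.len v) k' := by
  rw [pvAdvance.eq_def]; simp

theorem pvAdvance_pos (todo : List (String × List Int)) (ch : PySem.Dict String (List Int))
    (c : Int) (k : String) (h : c ≠ 0) : pvAdvance todo ch c k = (todo, ch, c, k) := by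
  rw [pvAdvance.eq_def]; simp [h]

theorem pv_noop (p : List Int) (ch : PySem.Dict String (List Int)) (k : String) :
    p.foldl pvBody ([], ch, 0, k) = ([], ch, 0, k) := by
  induction p with
  | nil => rfl
  | cons x p ih => simpa [pvBody, pvAdvance_nil] using ih

-- pvBody on a mid-chunk state appends the element to the current (last) chunk
theorem pvBody_mid (todo pre : List (String × List Int)) (k : String) (part : List Int)
    (c : Int) (x : Int) (hc : c ≠ 0) (hk : k ∉ pre.map Prod.fst) :
    pvBody (todo, (⟨pre ++ [(k, part)]⟩ : PySem.Dict String (List Int)), c, k) x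
      = (todo, (⟨pre ++ [(k, part ++ [x])]⟩ : PySem.Dict String (List Int)), c - 1, k) := by
  simp only [pvBody, pvAdvance_pos _ _ _ _ hc]
  rw [if_neg hc]
  simp only [pv_getD_mid pre [] k part hk, pv_insert_mid pre [] k part (part ++ [x]) hk (by simp)]

-- the main distribution lemma: both the fresh-key state (need = 0, START) and the
-- mid-chunk state (need = n+1, current key last in chunks, MID), by strong induction on p
theorem pv_both (N : Nat) : ∀ p : List Int, p.length ≤ N →
    (∀ (todo pre : List (String × List Int)) (k0 : String),
      (pre.map Prod.fst ++ todo.map Prod.fst).Nodup →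
      (p.foldl pvBody (todo, (⟨pre⟩ : PySem.Dict String (List Int)), 0, k0)).2.1.items
        = pre ++ pvTrunc p todo) ∧
    (∀ (todo pre : List (String × List Int)) (k : String) (part : List Int) (n : Nat),
      (pre.map Prod.fst ++ k :: todo.map Prod.fst).Nodup →
      (p.foldl pvBody (todo, (⟨pre ++ [(k, part)]⟩ : PySem.Dict String (List Int)),
          (n : Int) + 1, k)).2.1.items
        = pre ++ [(k, part ++ p.take (n + 1))] ++ pvTrunc (p.drop (n + 1)) todo) := by
  induction N with
  | zero =>
      intro p hp
      have : p = [] := List.eq_nil_of_length_eq_zero (Nat.le_zero.mp hp)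
      subst this
      exact ⟨fun todo pre k0 _ => by simp [pvTrunc_nil],
             fun todo pre k part n _ => by simp [pvTrunc_nil]⟩
  | succ N ih =>
      intro p hp
      cases p with
      | nil =>
          exact ⟨fun todo pre k0 _ => by simp [pvTrunc_nil],
                 fun todo pre k part n _ => by simp [pvTrunc_nil]⟩
      | cons x p' =>
          have hp' : p'.length ≤ N := by simpa using hp
          constructor
          · -- START
            intro todo
            induction todo with
            | nil =>
                intro pre k0 _
                rw [List.foldl_cons,
                  show pvBody ([], (⟨pre⟩ : PySem.Dict String (List Int)), 0, k0) x
                      = ([], (⟨pre⟩ : PySem.Dict String (List Int)), 0, k0) by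
                    simp [pvBody, pvAdvance_nil],
                  pv_noop]
                simp [pvTrunc]
            | cons hd t iht =>
                intro pre k0 hnd
                obtain ⟨k', v⟩ := hd
                have hk' : k' ∉ pre.map Prod.fst := by
                  simp only [List.map_cons, List.nodup_append] at hnd
                  intro hmem
                  exact hnd.2.2 _ hmem _ List.mem_cons_self rfl
                have hnd2 : ((pre ++ [(k', [])]).map Prod.fst ++ t.map Prod.fst).Nodup := by
                  simp only [List.map_cons] at hnd
                  rw [List.append_cons] at hnd
                  simpa using hnd
                cases hv : v.length with
                | zero =>
                    have hlen : PySem.List.len v = 0 := by simp [PySem.List.len, hv]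
                    have heq : pvBody ((k', v) :: t, (⟨pre⟩ : PySem.Dict String (List Int)), 0, k0) x
                        = pvBody (t, (⟨pre ++ [(k', [])]⟩ : PySem.Dict String (List Int)), 0, k') x := by
                      simp only [pvBody, pvAdvance_zero_cons,
                        pv_insert_new pre k' [] hk', hlen]
                    have := iht (pre ++ [(k', [])]) k' hnd2
                    rw [List.foldl_cons] at this ⊢
                    rw [heq, this]
                    simp [pvTrunc, hv]
                | succ m =>
                    have hlen : PySem.List.len v = (m : Int) + 1 := by
                      simp [PySem.List.len, hv]
                    have hne : ((m : Int) + 1) ≠ 0 := by omega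
                    have hbody : pvBody ((k', v) :: t, (⟨pre⟩ : PySem.Dict String (List Int)), 0, k0) x
                        = (t, (⟨pre ++ [(k', [x])]⟩ : PySem.Dict String (List Int)), (m : Int), k') := by
                      have h1 : pvBody ((k', v) :: t, (⟨pre⟩ : PySem.Dict String (List Int)), 0, k0) x
                          = pvBody (t, (⟨pre ++ [(k', [])]⟩ : PySem.Dict String (List Int)),
                              (m : Int) + 1, k') x := by
                        simp only [pvBody, pvAdvance_zero_cons,
                          pv_insert_new pre k' [] hk', hlen, pvAdvance_pos _ _ _ _ hne]
                      rw [h1, pvBody_mid t pre k' [] ((m : Int) + 1) x hne hk']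
                      simp
                    rw [List.foldl_cons, hbody]
                    have hnd3 : (pre.map Prod.fst ++ k' :: t.map Prod.fst).Nodup := by
                      simpa using hnd
                    cases m with
                    | zero =>
                        have hS := ((ih p' hp').1) t (pre ++ [(k', [x])]) k'
                          (by simp only [List.map_cons] at hnd
                              rw [List.append_cons] at hnd
                              simpa using hnd)
                        simp only [Nat.cast_zero] at *
                        rw [hS]
                        simp [pvTrunc, hv]
                    | succ m' =>
                        have hM := ((ih p' hp').2) t pre k' [x] m' hnd3
                        push_cast
                        rw [hM]
                        simp [pvTrunc, hv]
          · -- MID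
            intro todo pre k part n hnd
            have hk : k ∉ pre.map Prod.fst := by
              simp only [List.nodup_append] at hnd
              intro hmem
              exact hnd.2.2 _ hmem _ List.mem_cons_self rfl
            have hne : ((n : Int) + 1) ≠ 0 := by omega
            rw [List.foldl_cons, pvBody_mid todo pre k part ((n : Int) + 1) x hne hk]
            have hstep : ((n : Int) + 1) - 1 = (n : Int) := by ring
            rw [hstep]
            cases n with
            | zero =>
                have hS := ((ih p' hp').1) todo (pre ++ [(k, part ++ [x])]) k
                  (by rw [List.append_cons] at hnd; simpa using hnd)
                simp only [Nat.cast_zero] at *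
                rw [hS]
                simp
            | succ m =>
                have hM := ((ih p' hp').2) todo pre k (part ++ [x]) m hnd
                push_cast
                rw [hM]
                simp

theorem pv_chunks (p : List Int) (d : List (String × List Int))
    (h : (d.map Prod.fst).Nodup) :
    (p.foldl pvBody (d, (⟨[]⟩ : PySem.Dict String (List Int)), 0, "")).2.1.items
      = pvTrunc p d := by
  simpa using ((pv_both p.length p le_rfl).1) d [] "" (by simpa using h)

-- the write-back pass: each original value extended by the chunk looked up for its key
theorem pv_writeback (c : String → List Int) :
    ∀ (xs pre : List (String × List Int)),
    ((pre ++ xs).map Prod.fst).Nodup →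
    (xs.foldl (fun dd kv => dd.insert kv.1 (kv.2 ++ c kv.1))
        (⟨pre ++ xs⟩ : PySem.Dict String (List Int))).items
      = pre ++ xs.map (fun kv => (kv.1, kv.2 ++ c kv.1)) := by
  intro xs
  induction xs with
  | nil => intro pre _; simp
  | cons hd xt ih =>
      intro pre hnd
      obtain ⟨k, v⟩ := hd
      have hk : k ∉ pre.map Prod.fst := by
        simp only [List.map_append, List.map_cons, List.nodup_append] at hnd
        intro hmem
        exact hnd.2.2 _ hmem _ List.mem_cons_self rfl
      have ht : k ∉ xt.map Prod.fst := by
        simp only [List.map_append, List.map_cons, List.nodup_append, List.nodup_cons] at hnd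
        exact hnd.2.1.1
      simp only [List.foldl_cons]
      rw [pv_insert_mid pre xt k v (v ++ c k) hk ht,
        show (pre ++ (k, v ++ c k) :: xt) = (pre ++ [(k, v ++ c k)]) ++ xt by simp,
        ih (pre ++ [(k, v ++ c k)]) (by simpa using hnd)]
      simp

theorem pv_getD_nil (k : String) :
    (PySem.Dict.mk ([] : List (String × List Int))).getD k [] = [] := by
  simp [PySem.Dict.getD, PySem.Dict.get?]

theorem pv_getD_cons_self (k : String) (w : List Int) (rest : List (String × List Int)) :
    (PySem.Dict.mk ((k, w) :: rest)).getD k [] = w := by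
  simp [PySem.Dict.getD, PySem.Dict.get?, List.find?]

theorem pv_getD_cons_ne (k k' : String) (w : List Int) (rest : List (String × List Int))
    (h : k' ≠ k) :
    (PySem.Dict.mk ((k, w) :: rest)).getD k' [] = (PySem.Dict.mk rest).getD k' [] := by
  have hb : (k == k') = false := beq_eq_false_iff_ne.mpr (Ne.symm h)
  simp [PySem.Dict.getD, PySem.Dict.get?, List.find?, hb]

-- the looked-up chunks are exactly the pvZip extensions
theorem pv_zip_eq : ∀ (d : List (String × List Int)) (p : List Int),
    (d.map Prod.fst).Nodup →
    d.map (fun kv => (kv.1, kv.2 ++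
        (PySem.Dict.mk (pvTrunc p d)).getD kv.1 [])) = pvZip p d := by
  intro d
  induction d with
  | nil => intro p _; rfl
  | cons hd t ih =>
      intro p hnd
      obtain ⟨k, v⟩ := hd
      simp only [List.map_cons, List.nodup_cons] at hnd
      by_cases hp : p = []
      · subst hp
        have ih' := ih [] hnd.2
        rw [pvTrunc_nil] at ih'
        simp only [pvTrunc_nil, List.map_cons, pvZip, pv_getD_nil]
        simp
        simpa [pv_getD_nil] using ih'
      · have htr : pvTrunc p ((k, v) :: t)
            = (k, p.take v.length) :: pvTrunc (p.drop v.length) t := by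
          simp [pvTrunc, hp]
        simp only [List.map_cons, htr, pvZip, pv_getD_cons_self]
        refine List.cons_eq_cons.mpr ⟨rfl, ?_⟩
        rw [List.map_congr_left ?_]
        · exact ih (p.drop v.length) hnd.2
        · intro kv hkv
          have hne : kv.1 ≠ k := fun h => hnd.1 (h ▸ List.mem_map_of_mem hkv)
          rw [pv_getD_cons_ne k kv.1 _ _ hne]

-- pvTr in relative (take/drop) form
theorem pvTr_zip (p : List Int) : ∀ (t : List (String × List Int)) (e : Nat),
    pvTr p t ((e : Nat) : Int) = pvZip (p.drop e) t := by
  intro t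
  induction t with
  | nil => intro e; rfl
  | cons hd t ih =>
      intro e
      obtain ⟨k, v⟩ := hd
      have hsl : PySem.List.slice p (some ((e : Nat) : Int))
          (some (((e : Nat) : Int) + PySem.List.len v)) = (p.drop e).take v.length := by
        simpa [PySem.List.len] using PySem.List.slice_natCast_add p e v.length
      have hcast : ((e : Nat) : Int) + PySem.List.len v = ((e + v.length : Nat) : Int) := by
        simp [PySem.List.len]
      simp only [pvTr, pvZip]
      rw [hsl, hcast, ih (e + v.length), List.drop_drop]

-- ===== VERDICT (by name: the statement is the Claim_ definition above) =====
theorem addict_spec : Claim_equal_addict := by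
  intro d p _ hpre
  show addict d p = addict_alt d p
  have hnd : (d.map Prod.fst).Nodup := hpre
  -- A side
  have hz : ((⟨d⟩ : PySem.Dict String (List Int)).keys).zip
      ((⟨d⟩ : PySem.Dict String (List Int)).values) = d := by
    simp [PySem.Dict.keys, PySem.Dict.values, List.zip_map']
  have hA : addict d p = pvTr p d 0 := by
    simp only [addict]
    rw [hz, pv_foldA0 p d hnd]
  -- B side
  have hch : (p.foldl pvBody (d, (⟨[]⟩ : PySem.Dict String (List Int)), 0, "")).2.1
      = ⟨pvTrunc p d⟩ := by
    rw [← pv_chunks p d hnd]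
  have hB : addict_alt d p = pvZip p d := by
    show ((d.foldl (fun dd kv => dd.insert kv.1 (kv.2 ++
        (p.foldl pvBody (d, (⟨[]⟩ : PySem.Dict String (List Int)), 0, "")).2.1.getD kv.1 []))
        (⟨d⟩ : PySem.Dict String (List Int))).items) = pvZip p d
    rw [hch]
    have hw := pv_writeback
      (fun k => (PySem.Dict.mk (pvTrunc p d)).getD k []) d []
      (by simpa using hnd)
    simp only [List.nil_append] at hw
    rw [hw, pv_zip_eq d p hnd]
  rw [hA, hB]
  simpa using pvTr_zip p d 0
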